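-- pv_equiv track=rewrite | github.com/Laboratoire-de-Chemoinformatique/SynPlanner | synplan/utils/tree_visualization/clusters.py | normalize_strat_bonds
-- ===== SOURCE A (Python) =====
-- from typing import Iterable, Optional
--
-- def normalize_strat_bonds(
--     strat_bonds: Optional[Iterable[Iterable[int]]],
-- ) -> list[list[int]]:
--     if not strat_bonds:
--         return []
--
--     normalized: list[list[int]] = []
--     seen: set[tuple[int, int]] = set()
--     for bond in strat_bonds:
--         if not bond or len(bond) < 2:
--             continue
--         try:
--             a, b = bond
--         except (TypeError, ValueError):
--             continue
--         try:
--             a_int = int(a)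
--             b_int = int(b)
--         except (TypeError, ValueError):
--             continue
--
--         pair = tuple(sorted((a_int, b_int)))
--         if pair in seen:
--             continue
--         seen.add(pair)
--         normalized.append([pair[0], pair[1]])
--
--     normalized.sort()
--     return normalized
-- ===== SOURCE B (Python) =====
-- from typing import Iterable, Optional
--
--
-- def normalize_strat_bonds(
--     strat_bonds: Optional[Iterable[Iterable[int]]],
-- ) -> list[list[int]]:
--     if not strat_bonds:
--         return []
--
--     # Collect every valid normalized pair (duplicates included), then sort
--     # once and strip consecutive duplicates in a single pass.
--     pairs: list[list[int]] = []
--     for bond in strat_bonds: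
--         if not bond or len(bond) < 2:
--             continue
--         try:
--             a, b = bond
--         except (TypeError, ValueError):
--             continue
--         try:
--             a_int = int(a)
--             b_int = int(b)
--         except (TypeError, ValueError):
--             continue
--         if a_int <= b_int:
--             pairs.append([a_int, b_int])
--         else:
--             pairs.append([b_int, a_int])
--
--     pairs.sort()
--
--     result: list[list[int]] = []
--     prev = None
--     for p in pairs:
--         if p != prev:
--             result.append(p)
--             prev = p
--     return result
-- ===== Notes on version B (the rewrite author's own statement) =====
-- stated objective: alternative
-- what changed: Dropped the running 'seen' set: B collects every valid normalized pair (with duplicates), sorts once, and removes duplicates in a single adjacent-comparison pass over the sorted list instead of a set-membership test inside the collection loop.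
import Mathlib
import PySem

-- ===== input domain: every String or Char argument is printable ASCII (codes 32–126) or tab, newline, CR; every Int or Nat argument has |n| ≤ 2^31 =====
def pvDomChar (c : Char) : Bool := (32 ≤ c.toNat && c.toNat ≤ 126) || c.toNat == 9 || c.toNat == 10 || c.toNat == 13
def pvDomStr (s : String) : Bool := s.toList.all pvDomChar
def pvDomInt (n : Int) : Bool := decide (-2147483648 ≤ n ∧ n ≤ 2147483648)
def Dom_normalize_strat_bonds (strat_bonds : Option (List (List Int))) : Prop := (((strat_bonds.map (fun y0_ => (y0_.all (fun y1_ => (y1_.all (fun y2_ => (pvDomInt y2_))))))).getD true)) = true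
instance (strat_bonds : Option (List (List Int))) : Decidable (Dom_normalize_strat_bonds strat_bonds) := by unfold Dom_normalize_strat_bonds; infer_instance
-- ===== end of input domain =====

-- B drops A's running 'seen' set: it collects every valid normalized pair, sorts once,
-- and removes duplicates in a single adjacent-comparison pass (alternative decomposition, same asymptotic cost).


-- ===== PORT A =====
-- 'if not strat_bonds: return []' covers None and the empty list.
-- For each bond: 'if not bond or len(bond) < 2: continue' skips [] and singletons, and
-- 'a, b = bond' raises ValueError (→ continue) unless the list has exactly two elements,
-- so only bonds of shape [a, b] survive; int(a)/int(b) are identities on ints.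
-- 'pair = tuple(sorted((a_int, b_int)))' is the ordered pair (min, max).
def normalize_strat_bonds (strat_bonds : Option (List (List Int))) : List (List Int) :=
  match strat_bonds with
  | none => []
  | some bonds =>
    if bonds.isEmpty then []
    else
      let st := bonds.foldl
        (fun (s : List (List Int) × PySem.Set (Int × Int)) bond =>
          match bond with
          | [a, b] =>
            let pair : Int × Int := if a ≤ b then (a, b) else (b, a)
            if pair ∈ s.2 then s
            else (s.1 ++ [[pair.1, pair.2]], PySem.Set.add s.2 pair)
          | _ => s)
        ([], PySem.Set.empty)
      PySem.List.sorted st.1 (fun x => x) false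

-- ===== PORT B =====
def normalize_strat_bonds_alt (strat_bonds : Option (List (List Int))) : List (List Int) :=
  match strat_bonds with
  | some bonds =>
    if bonds.isEmpty then []
    else
      let pairs := bonds.foldl
        (fun (acc : List (List Int)) bond =>
          match bond with
          | [] => acc
          | [_] => acc
          | _ :: _ :: _ :: _ => acc
          | [a, b] => if a ≤ b then acc ++ [[a, b]] else acc ++ [[b, a]])
        []
      let sortedPairs := PySem.List.sorted pairs (fun x => x) false
      (sortedPairs.foldl
        (fun (s : List (List Int) × Option (List Int)) p =>
          if some p ≠ s.2 then (s.1 ++ [p], some p) else s)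
        ([], none)).1
  | none => []

-- ===== PRECONDITION & SPEC =====
def Spec_normalize_strat_bonds (strat_bonds : Option (List (List Int))) (out : List (List Int)) : Prop := out = normalize_strat_bonds_alt strat_bonds
instance (strat_bonds : Option (List (List Int))) (out : List (List Int)) : Decidable (Spec_normalize_strat_bonds strat_bonds out) := by unfold Spec_normalize_strat_bonds; infer_instance

-- ===== CLAIM (what is proved, stated in full; the proofs are below) =====
def Claim_equal_normalize_strat_bonds : Prop := ∀ (strat_bonds : Option (List (List Int))), Dom_normalize_strat_bonds strat_bonds → Spec_normalize_strat_bonds strat_bonds (normalize_strat_bonds strat_bonds)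

-- ===== LEMMAS AND PROOFS =====

-- the tuple (min, max) a valid bond [a, b] contributes, and its 2-list form
def pvTpair (bond : List Int) : Option (Int × Int) :=
  match bond with
  | [a, b] => some (if a ≤ b then (a, b) else (b, a))
  | _ => none

def pvToL (p : Int × Int) : List Int := [p.1, p.2]

theorem pvToL_injective : Function.Injective pvToL := by
  intro p q h
  simp only [pvToL, List.cons.injEq, and_true] at h
  exact Prod.ext h.1 h.2

-- adjacent-dedup recursion (proof-side model of B's second loop)
def pvAdj : List (List Int) → Option (List Int) → List (List Int)
  | [], _ => []
  | p :: ps, prev => if some p ≠ prev then p :: pvAdj ps (some p) else pvAdj ps prev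

-- B's dedup fold computes pvAdj
theorem pvAdj_fold (l : List (List Int)) (acc : List (List Int)) (prev : Option (List Int)) :
    (l.foldl (fun (s : List (List Int) × Option (List Int)) p =>
        if some p ≠ s.2 then (s.1 ++ [p], some p) else s) (acc, prev)).1
      = acc ++ pvAdj l prev := by
  induction l generalizing acc prev with
  | nil => simp [pvAdj]
  | cons p ps ih =>
    simp only [List.foldl_cons, pvAdj]
    by_cases h : some p = prev
    · rw [if_neg (fun hc => hc h), if_neg (fun hc => hc h)]
      exact ih acc prev
    · rw [if_pos h, if_pos h, ih (acc ++ [p]) (some p)]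
      simp

-- B's collection fold collects pvToL of every valid pair, in order
theorem pvB_collect (bonds : List (List Int)) (acc : List (List Int)) :
    bonds.foldl
        (fun (acc : List (List Int)) bond =>
          match bond with
          | [] => acc
          | [_] => acc
          | _ :: _ :: _ :: _ => acc
          | [a, b] => if a ≤ b then acc ++ [[a, b]] else acc ++ [[b, a]]) acc
      = acc ++ (bonds.filterMap pvTpair).map pvToL := by
  induction bonds generalizing acc with
  | nil => simp
  | cons bond rest ih =>
    match bond with
    | [] => simpa [pvTpair] using ih acc
    | [a] => simpa [pvTpair] using ih acc
    | a :: b :: c :: t => simpa [pvTpair] using ih acc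
    | [a, b] =>
      by_cases h : a ≤ b <;>
        simp [pvTpair, pvToL, h, ih, List.append_assoc]

-- A's fold maintains: seen = set(tuples so far), normalized = first occurrences as 2-lists
theorem pvA_fold (bonds : List (List Int)) (ts : List (Int × Int)) :
    bonds.foldl
        (fun (s : List (List Int) × PySem.Set (Int × Int)) bond =>
          match bond with
          | [a, b] =>
            let pair : Int × Int := if a ≤ b then (a, b) else (b, a)
            if pair ∈ s.2 then s
            else (s.1 ++ [[pair.1, pair.2]], PySem.Set.add s.2 pair)
          | _ => s)
        ((PySem.Set.ofList ts).map pvToL, PySem.Set.ofList ts)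
      = ((PySem.Set.ofList (ts ++ bonds.filterMap pvTpair)).map pvToL,
         PySem.Set.ofList (ts ++ bonds.filterMap pvTpair)) := by
  induction bonds generalizing ts with
  | nil => simp
  | cons bond rest ih =>
    match bond with
    | [] => simpa [pvTpair] using ih ts
    | [a] => simpa [pvTpair] using ih ts
    | a :: b :: c :: t => simpa [pvTpair] using ih ts
    | [a, b] =>
      simp only [List.foldl_cons, List.filterMap_cons, pvTpair]
      set pair : Int × Int := if a ≤ b then (a, b) else (b, a) with hp
      by_cases hmem : pair ∈ PySem.Set.ofList ts
      · have h1 : PySem.Set.ofList (ts ++ [pair]) = PySem.Set.ofList ts := by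
          rw [PySem.Set.ofList_append_singleton, PySem.Set.add_of_mem hmem]
        have := ih (ts ++ [pair])
        rw [h1] at this
        simpa [hmem, List.append_assoc] using this
      · have h1 : PySem.Set.ofList (ts ++ [pair]) = PySem.Set.ofList ts ++ [pair] := by
          rw [PySem.Set.ofList_append_singleton, PySem.Set.add_of_not_mem hmem]
        have := ih (ts ++ [pair])
        rw [h1] at this
        simpa [hmem, pvToL, List.append_assoc] using this

-- set(xs) commutes with mapping an injective function
theorem pvSet_add_map {f : Int × Int → List Int} (hf : Function.Injective f)
    (s : List (Int × Int)) (x : Int × Int) :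
    (PySem.Set.add s x).map f = PySem.Set.add (s.map f) (f x) := by
  rw [PySem.Set.add_eq_ite, PySem.Set.add_eq_ite]
  by_cases h : x ∈ s
  · simp [h, List.mem_map_of_mem]
  · have : f x ∉ s.map f := by
      intro hc
      obtain ⟨y, hy, hyx⟩ := List.mem_map.mp hc
      exact h (hf hyx ▸ hy)
    simp [h, this]

theorem pvSet_ofList_map {f : Int × Int → List Int} (hf : Function.Injective f)
    (l : List (Int × Int)) :
    (PySem.Set.ofList l).map f = PySem.Set.ofList (l.map f) := by
  induction l using List.reverseRecOn with
  | nil => simp [PySem.Set.ofList]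
  | append_singleton xs x ih =>
    rw [List.map_append, List.map_singleton, PySem.Set.ofList_append_singleton,
        PySem.Set.ofList_append_singleton, pvSet_add_map hf, ih]

-- what pvAdj does on a ≤-sorted list: strictly increasing, keeps exactly the distinct elements
theorem pvAdj_spec (l : List (List Int)) (hs : l.Pairwise (· ≤ ·)) :
    ((pvAdj l none).Pairwise (· < ·) ∧ (∀ x, x ∈ pvAdj l none ↔ x ∈ l)) ∧
    (∀ q, (∀ x ∈ l, q ≤ x) →
      (pvAdj l (some q)).Pairwise (· < ·) ∧ (∀ x, x ∈ pvAdj l (some q) ↔ x ∈ l ∧ x ≠ q)) := by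
  induction l with
  | nil => simp [pvAdj]
  | cons p ps ih =>
    have h1 : ∀ x ∈ ps, p ≤ x := fun x hx => List.rel_of_pairwise_cons hs hx
    have ih' := ih (List.Pairwise.of_cons hs)
    obtain ⟨hp1, hp2⟩ := ih'.2 p h1
    have headCase :
        (p :: pvAdj ps (some p)).Pairwise (· < ·) ∧
        (∀ x, x ∈ p :: pvAdj ps (some p) ↔ x = p ∨ x ∈ ps) := by
      constructor
      · refine List.pairwise_cons.mpr ⟨?_, hp1⟩
        intro x hx
        obtain ⟨hxps, hxne⟩ := (hp2 x).mp hx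
        exact lt_of_le_of_ne (h1 x hxps) (Ne.symm hxne)
      · intro x
        simp only [List.mem_cons, hp2]
        constructor
        · rintro (rfl | ⟨h, _⟩)
          · exact Or.inl rfl
          · exact Or.inr h
        · rintro (rfl | h)
          · exact Or.inl rfl
          · by_cases hxp : x = p
            · exact Or.inl hxp
            · exact Or.inr ⟨h, hxp⟩
    constructor
    · have : pvAdj (p :: ps) none = p :: pvAdj ps (some p) := by simp [pvAdj]
      rw [this]
      exact ⟨headCase.1, fun x => by rw [headCase.2 x]; simp [List.mem_cons]⟩
    · intro q hq
      by_cases hpq : p = q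
      · have : pvAdj (p :: ps) (some q) = pvAdj ps (some q) := by simp [pvAdj, hpq]
        rw [this]
        subst hpq
        refine ⟨hp1, fun x => ?_⟩
        rw [hp2 x]
        simp only [List.mem_cons]
        constructor
        · rintro ⟨h, hne⟩; exact ⟨Or.inr h, hne⟩
        · rintro ⟨(rfl | h), hne⟩
          · exact absurd rfl hne
          · exact ⟨h, hne⟩
      · have : pvAdj (p :: ps) (some q) = p :: pvAdj ps (some p) := by
          simp [pvAdj, hpq]
        rw [this]
        refine ⟨headCase.1, fun x => ?_⟩
        rw [headCase.2 x]
        have hqp : q ≤ p := hq p (List.mem_cons_self ..)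
        constructor
        · rintro (rfl | h)
          · exact ⟨List.mem_cons_self .., fun hc => hpq hc⟩
          · refine ⟨List.mem_cons_of_mem _ h, ?_⟩
            rintro rfl
            exact hpq (le_antisymm (h1 _ h) hqp)
        · rintro ⟨hmem, hne⟩
          rcases List.mem_cons.mp hmem with rfl | h
          · exact Or.inl rfl
          · exact Or.inr h

-- the default LT instance on List Int is the lexicographic LinearOrder one
theorem pvLT_eq : (List.instLT : LT (List Int)) = List.instLinearOrder.toLT :=
  congrArg LT.mk (funext fun a => funext fun b => propext (List.lt_iff_lex_lt a b))

theorem pvSorted_inst (xs : List (List Int)) :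
    PySem.List.sorted xs (fun x => x) false
      = @PySem.List.sorted (List Int) (List Int) List.instLinearOrder.toLT
          LinearOrder.toDecidableLT xs (fun x => x) false := by
  have key : ∀ (i : LT (List Int)) (d : @DecidableLT (List Int) i),
      i = List.instLinearOrder.toLT →
      @PySem.List.sorted (List Int) (List Int) i d xs (fun x => x) false
        = @PySem.List.sorted (List Int) (List Int) List.instLinearOrder.toLT
            LinearOrder.toDecidableLT xs (fun x => x) false := by
    intro i d h
    subst h
    have hd : d = LinearOrder.toDecidableLT := by
      funext a b
      exact Subsingleton.elim _ _
    rw [hd]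
  exact key _ _ pvLT_eq

-- main combinatorial fact: sorted(set(L)) equals the adjacent-dedup of sorted(L)
theorem pvMain (L : List (List Int)) :
    PySem.List.sorted (PySem.Set.ofList L) (fun x => x) false
      = pvAdj (PySem.List.sorted L (fun x => x) false) none := by
  rw [pvSorted_inst, pvSorted_inst]
  set S := @PySem.List.sorted (List Int) (List Int) List.instLinearOrder.toLT
      LinearOrder.toDecidableLT L (fun x => x) false with hS
  have hsorted : S.Pairwise (· ≤ ·) := by
    rw [hS]; exact PySem.List.sorted_pairwise L (fun x => x)
  obtain ⟨⟨hlt, hmem⟩, _⟩ := pvAdj_spec S hsorted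
  have hmemL : ∀ x, x ∈ pvAdj S none ↔ x ∈ L := by
    intro x
    rw [hmem x, hS,
      @PySem.List.mem_sorted (List Int) (List Int) List.instLinearOrder.toLT
        LinearOrder.toDecidableLT L (fun x => x) false x]
  have hnodupAdj : (pvAdj S none).Nodup := hlt.imp ne_of_lt
  have hperm : (pvAdj S none).Perm (PySem.Set.ofList L) := by
    rw [List.perm_ext_iff_of_nodup hnodupAdj (PySem.Set.nodup_ofList L)]
    intro x
    rw [hmemL x, PySem.Set.mem_ofList]
  exact PySem.List.sorted_eq_of_perm_of_pairwise_lt (PySem.Set.ofList L) (pvAdj S none)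
    (fun x => x) hperm hlt

-- ===== VERDICT (by name: the statement is the Claim_ definition above) =====
theorem normalize_strat_bonds_spec : Claim_equal_normalize_strat_bonds := by
  intro strat_bonds _
  unfold Spec_normalize_strat_bonds normalize_strat_bonds normalize_strat_bonds_alt
  match strat_bonds with
  | none => rfl
  | some bonds =>
    by_cases hne : bonds.isEmpty
    · simp [hne]
    · simp only [hne, Bool.false_eq_true, if_false]
      have hA : bonds.foldl
          (fun (s : List (List Int) × PySem.Set (Int × Int)) bond =>
            match bond with
            | [a, b] =>
              let pair : Int × Int := if a ≤ b then (a, b) else (b, a)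
              if pair ∈ s.2 then s
              else (s.1 ++ [[pair.1, pair.2]], PySem.Set.add s.2 pair)
            | _ => s) ([], PySem.Set.empty)
          = ((PySem.Set.ofList (bonds.filterMap pvTpair)).map pvToL,
             PySem.Set.ofList (bonds.filterMap pvTpair)) := by
        have h := pvA_fold bonds []
        simpa using h
      have hB := pvB_collect bonds []
      simp only [List.nil_append] at hB
      rw [hA, hB]
      rw [pvSet_ofList_map pvToL_injective]
      rw [pvAdj_fold _ [] none, List.nil_append]
      exact pvMain ((bonds.filterMap pvTpair).map pvToL)
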